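-- pv_equiv track=rewrite | github.com/enstest1/stardock_podium | quality_checker.py | _generate_audio_recommendations
-- ===== SOURCE A (Python) =====
-- from typing import Dict, List, Any, Optional, Union
--
-- def _generate_audio_recommendations(issues: List[Dict[str, Any]]) -> List[str]:
--     """Generate recommendations based on audio issues.
--
--     Args:
--         issues: List of audio issues
--
--     Returns:
--         List of recommendations
--     """
--     recommendations = []
--
--     # Count issues by type
--     integrity_issues = [i for i in issues if "integrity" in i.get("description", "").lower()]
--     property_issues = [i for i in issues if any(term in i.get("description", "").lower()
--                                              for term in ["sample rate", "bit rate", "codec", "channels"])]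
--     scene_issues = [i for i in issues if "scene" in i.get("location", "").lower()]
--
--     # Recommendations for integrity issues
--     if integrity_issues:
--         recommendations.append(
--             "Regenerate audio files that have integrity issues to ensure playability."
--         )
--
--     # Recommendations for property issues
--     if property_issues:
--         rate_issues = [i for i in property_issues if "rate" in i.get("description", "").lower()]
--         if rate_issues:
--             recommendations.append(
--                 "Increase audio quality settings (sample rate, bit rate) for better sound fidelity."
--             )
--
--     # Recommendations for scene issues
--     if scene_issues:
--         missing_scenes = [i for i in scene_issues if "missing" in i.get("description", "").lower()]
--         if missing_scenes:
--             recommendations.append(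
--                 "Generate audio for all scenes to ensure complete episode coverage."
--             )
--
--     # Generic recommendation if none specific
--     if not recommendations:
--         recommendations.append(
--             "Consider normalizing audio levels across all scenes for consistent volume."
--         )
--
--     return recommendations
-- ===== SOURCE B (Python) =====
-- def _generate_audio_recommendations(issues):
--     """Single pass over issues setting three flags, then build the list."""
--     has_integrity = has_rate = has_missing_scene = False
--     for i in issues:
--         desc = i.get("description", "").lower()
--         loc = i.get("location", "").lower()
--         if "integrity" in desc:
--             has_integrity = True
--         if "rate" in desc and any(t in desc for t in ("sample rate", "bit rate", "codec", "channels")):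
--             has_rate = True
--         if "scene" in loc and "missing" in desc:
--             has_missing_scene = True
--     recommendations = []
--     if has_integrity:
--         recommendations.append(
--             "Regenerate audio files that have integrity issues to ensure playability."
--         )
--     if has_rate:
--         recommendations.append(
--             "Increase audio quality settings (sample rate, bit rate) for better sound fidelity."
--         )
--     if has_missing_scene:
--         recommendations.append(
--             "Generate audio for all scenes to ensure complete episode coverage."
--         )
--     if not recommendations:
--         recommendations.append(
--             "Consider normalizing audio levels across all scenes for consistent volume."
--         )
--     return recommendations
-- ===== Notes on version B (the rewrite author's own statement) =====
-- stated objective: simpler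
-- what changed: Replaces four list-comprehension passes plus two refiltering passes with a single loop over issues that maintains three boolean flags, then emits the recommendations from the flags.
import Mathlib
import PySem

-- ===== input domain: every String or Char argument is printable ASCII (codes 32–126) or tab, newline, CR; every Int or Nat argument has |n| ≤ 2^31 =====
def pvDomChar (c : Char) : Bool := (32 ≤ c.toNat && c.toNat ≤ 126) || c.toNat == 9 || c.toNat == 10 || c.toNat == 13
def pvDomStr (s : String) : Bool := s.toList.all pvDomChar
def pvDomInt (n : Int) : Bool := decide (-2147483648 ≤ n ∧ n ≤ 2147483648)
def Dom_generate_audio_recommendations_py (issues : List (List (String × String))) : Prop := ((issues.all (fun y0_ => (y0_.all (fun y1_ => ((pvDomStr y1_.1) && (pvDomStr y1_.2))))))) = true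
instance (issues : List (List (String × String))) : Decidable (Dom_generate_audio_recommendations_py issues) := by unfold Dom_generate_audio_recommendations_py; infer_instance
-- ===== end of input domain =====

-- One honest line: B replaces A's four filter passes (plus two refilterings) with a single
-- loop maintaining three boolean flags — simpler, same results.

-- ===== PORT A =====
def pvDescA (i : List (String × String)) : String :=
  PySem.Str.lower (PySem.Dict.getD (PySem.Dict.mk i) "description" "")

def pvLocA (i : List (String × String)) : String :=
  PySem.Str.lower (PySem.Dict.getD (PySem.Dict.mk i) "location" "")

def generate_audio_recommendations_py (issues : List (List (String × String))) : List String :=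
  let integrity_issues := issues.filter (fun i => PySem.Str.isIn "integrity" (pvDescA i))
  let property_issues := issues.filter (fun i =>
    (["sample rate", "bit rate", "codec", "channels"].any (fun term => PySem.Str.isIn term (pvDescA i))))
  let scene_issues := issues.filter (fun i => PySem.Str.isIn "scene" (pvLocA i))
  let recommendations : List String := []
  let recommendations :=
    if integrity_issues ≠ [] then
      recommendations ++ ["Regenerate audio files that have integrity issues to ensure playability."]
    else recommendations
  let recommendations :=
    if property_issues ≠ [] then
      let rate_issues := property_issues.filter (fun i => PySem.Str.isIn "rate" (pvDescA i))
      if rate_issues ≠ [] then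
        recommendations ++ ["Increase audio quality settings (sample rate, bit rate) for better sound fidelity."]
      else recommendations
    else recommendations
  let recommendations :=
    if scene_issues ≠ [] then
      let missing_scenes := scene_issues.filter (fun i => PySem.Str.isIn "missing" (pvDescA i))
      if missing_scenes ≠ [] then
        recommendations ++ ["Generate audio for all scenes to ensure complete episode coverage."]
      else recommendations
    else recommendations
  let recommendations :=
    if recommendations = [] then
      recommendations ++ ["Consider normalizing audio levels across all scenes for consistent volume."]
    else recommendations
  recommendations

-- ===== PORT B =====
-- one step of B's loop: update the three flags from one issue
def pvStepB (f : Bool × Bool × Bool) (i : List (String × String)) : Bool × Bool × Bool :=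
  let desc := PySem.Str.lower (PySem.Dict.getD (PySem.Dict.mk i) "description" "")
  let loc := PySem.Str.lower (PySem.Dict.getD (PySem.Dict.mk i) "location" "")
  let f1 := if PySem.Str.isIn "integrity" desc then true else f.1
  let f2 := if PySem.Str.isIn "rate" desc &&
               (["sample rate", "bit rate", "codec", "channels"].any (fun t => PySem.Str.isIn t desc))
            then true else f.2.1
  let f3 := if PySem.Str.isIn "scene" loc && PySem.Str.isIn "missing" desc then true else f.2.2
  (f1, f2, f3)

def generate_audio_recommendations_py_alt (issues : List (List (String × String))) : List String :=
  let flags := issues.foldl pvStepB (false, false, false)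
  let recommendations : List String := []
  let recommendations :=
    if flags.1 then
      recommendations ++ ["Regenerate audio files that have integrity issues to ensure playability."]
    else recommendations
  let recommendations :=
    if flags.2.1 then
      recommendations ++ ["Increase audio quality settings (sample rate, bit rate) for better sound fidelity."]
    else recommendations
  let recommendations :=
    if flags.2.2 then
      recommendations ++ ["Generate audio for all scenes to ensure complete episode coverage."]
    else recommendations
  let recommendations :=
    if recommendations = [] then
      recommendations ++ ["Consider normalizing audio levels across all scenes for consistent volume."]
    else recommendations
  recommendations

-- ===== PRECONDITION & SPEC =====
def Spec_generate_audio_recommendations_py (issues : List (List (String × String))) (out : List String) : Prop := out = generate_audio_recommendations_py_alt issues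
instance (issues : List (List (String × String))) (out : List String) : Decidable (Spec_generate_audio_recommendations_py issues out) := by unfold Spec_generate_audio_recommendations_py; infer_instance

-- ===== CLAIM (what is proved, stated in full; the proofs are below) =====
def Claim_equal_generate_audio_recommendations_py : Prop := ∀ (issues : List (List (String × String))), Dom_generate_audio_recommendations_py issues → Spec_generate_audio_recommendations_py issues (generate_audio_recommendations_py issues)

-- ===== LEMMAS AND PROOFS =====

-- B's fold computes, componentwise, 'initial flag OR some issue satisfies the predicate'
theorem pvFoldB_eq (issues : List (List (String × String))) (f : Bool × Bool × Bool) :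
    issues.foldl pvStepB f =
      (f.1 || issues.any (fun i => PySem.Str.isIn "integrity" (pvDescA i)),
       f.2.1 || issues.any (fun i => PySem.Str.isIn "rate" (pvDescA i) &&
          (["sample rate", "bit rate", "codec", "channels"].any (fun t => PySem.Str.isIn t (pvDescA i)))),
       f.2.2 || issues.any (fun i => PySem.Str.isIn "scene" (pvLocA i) && PySem.Str.isIn "missing" (pvDescA i))) := by
  induction issues generalizing f with
  | nil => simp
  | cons x xs ih =>
    simp only [List.foldl_cons, List.any_cons, ih]
    simp only [pvStepB, pvDescA, pvLocA]
    obtain ⟨a, b, c⟩ := f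
    refine Prod.ext ?_ (Prod.ext ?_ ?_) <;> dsimp only <;>
      split_ifs <;> cases a <;> cases b <;> cases c <;>
        simp_all only [List.any_cons, List.any_nil, Bool.or_false, Bool.false_or,
          Bool.or_true, Bool.true_or,]

theorem pvFilter_ne_nil (issues : List (List (String × String))) (q : List (String × String) → Bool) :
    (issues.filter q ≠ []) ↔ issues.any q = true := by
  rw [Ne, List.filter_eq_nil_iff, List.any_eq_true]
  constructor
  · intro h
    by_contra hc
    exact h (fun a ha hq => hc ⟨a, ha, hq⟩)
  · rintro ⟨x, hx, hq⟩ h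
    exact h x hx hq

-- ===== VERDICT (by name: the statement is the Claim_ definition above) =====
theorem generate_audio_recommendations_py_spec : Claim_equal_generate_audio_recommendations_py := by
  intro issues _
  show generate_audio_recommendations_py issues = generate_audio_recommendations_py_alt issues
  unfold generate_audio_recommendations_py generate_audio_recommendations_py_alt
  rw [pvFoldB_eq]
  simp only [List.filter_filter, pvFilter_ne_nil]
  rw [show (fun i => PySem.Str.isIn "missing" (pvDescA i) && PySem.Str.isIn "scene" (pvLocA i))
        = (fun i => PySem.Str.isIn "scene" (pvLocA i) && PySem.Str.isIn "missing" (pvDescA i))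
      from funext fun i => Bool.and_comm _ _]
  by_cases h2 : issues.any (fun i => PySem.Str.isIn "rate" (pvDescA i) &&
      (["sample rate", "bit rate", "codec", "channels"].any (fun t => PySem.Str.isIn t (pvDescA i)))) = true
  · have hp : issues.any (fun i =>
        (["sample rate", "bit rate", "codec", "channels"].any (fun t => PySem.Str.isIn t (pvDescA i)))) = true := by
      rw [List.any_eq_true] at h2 ⊢
      obtain ⟨x, hx, hxx⟩ := h2
      exact ⟨x, hx, (Bool.and_eq_true_iff.mp hxx).2⟩
    by_cases h3 : issues.any (fun i =>
        PySem.Str.isIn "scene" (pvLocA i) && PySem.Str.isIn "missing" (pvDescA i)) = true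
    · have hs : issues.any (fun i => PySem.Str.isIn "scene" (pvLocA i)) = true := by
        rw [List.any_eq_true] at h3 ⊢
        obtain ⟨x, hx, hxx⟩ := h3
        exact ⟨x, hx, (Bool.and_eq_true_iff.mp hxx).1⟩
      by_cases h1 : issues.any (fun i => PySem.Str.isIn "integrity" (pvDescA i)) = true <;>
        (simp only [h1, h2, h3, hp, hs]; simp)
    · by_cases h1 : issues.any (fun i => PySem.Str.isIn "integrity" (pvDescA i)) = true <;>
      by_cases hs : issues.any (fun i => PySem.Str.isIn "scene" (pvLocA i)) = true <;>
        (simp only [h1, h2, h3, hp, hs]; simp)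
  · by_cases h3 : issues.any (fun i =>
        PySem.Str.isIn "scene" (pvLocA i) && PySem.Str.isIn "missing" (pvDescA i)) = true
    · have hs : issues.any (fun i => PySem.Str.isIn "scene" (pvLocA i)) = true := by
        rw [List.any_eq_true] at h3 ⊢
        obtain ⟨x, hx, hxx⟩ := h3
        exact ⟨x, hx, (Bool.and_eq_true_iff.mp hxx).1⟩
      by_cases h1 : issues.any (fun i => PySem.Str.isIn "integrity" (pvDescA i)) = true <;>
      by_cases hp : issues.any (fun i =>
        (["sample rate", "bit rate", "codec", "channels"].any (fun t => PySem.Str.isIn t (pvDescA i)))) = true <;>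
        (simp only [h1, h2, h3, hp, hs]; simp)
    · by_cases h1 : issues.any (fun i => PySem.Str.isIn "integrity" (pvDescA i)) = true <;>
      by_cases hp : issues.any (fun i =>
        (["sample rate", "bit rate", "codec", "channels"].any (fun t => PySem.Str.isIn t (pvDescA i)))) = true <;>
      by_cases hs : issues.any (fun i => PySem.Str.isIn "scene" (pvLocA i)) = true <;>
        (simp only [h1, h2, h3, hp, hs]; simp)
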